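-- pv_equiv track=rewrite | github.com/steveweiss1/adventofcode | python/advent2024/q21.py | num_turns2
-- ===== SOURCE A (Python) =====
-- def num_turns2(s):
--     total = 0
--     for i in range(len(s) - 1):
--         if s[i] != s[i + 1]:
--             total += 1
--             if s[i] == '<':
--                 total += 1
--     return total
-- ===== SOURCE B (Python) =====
-- def num_turns2(s):
--     # collapse s into maximal runs; answer = (#runs - 1) + (# '<' runs that are not last)
--     keys = []
--     i = 0
--     n = len(s)
--     while i < n:
--         c = s[i]
--         keys.append(c)
--         while i < n and s[i] == c:
--             i += 1
--     if not keys: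
--         return 0
--     return len(keys) - 1 + keys[:-1].count('<')
-- ===== Notes on version B (the rewrite author's own statement) =====
-- stated objective: alternative
-- what changed: B collapses the string into maximal runs (run keys) and computes the answer arithmetically as (#runs - 1) + (count of '<' run keys excluding the last run), instead of A's scan over adjacent index pairs.
import Mathlib
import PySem

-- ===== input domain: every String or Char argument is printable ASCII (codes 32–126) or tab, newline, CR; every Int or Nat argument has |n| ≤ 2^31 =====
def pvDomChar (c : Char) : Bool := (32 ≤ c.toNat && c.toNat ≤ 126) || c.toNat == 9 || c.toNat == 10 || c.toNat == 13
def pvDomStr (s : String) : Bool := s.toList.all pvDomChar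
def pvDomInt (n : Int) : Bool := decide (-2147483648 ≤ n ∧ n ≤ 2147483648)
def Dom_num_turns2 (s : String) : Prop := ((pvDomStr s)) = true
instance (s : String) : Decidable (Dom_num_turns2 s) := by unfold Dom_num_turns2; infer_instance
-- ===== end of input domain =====

-- B collapses the string into maximal runs and combines counts arithmetically; same cost, different decomposition.

-- ===== PORT A =====
def num_turns2 (s : String) : Int :=
  (PySem.List.pyRange 0 (PySem.Str.len s - 1) 1).foldl
    (fun total i =>
      if PySem.List.pyGetD s.toList i ' ' ≠ PySem.List.pyGetD s.toList (i + 1) ' ' then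
        (if PySem.List.pyGetD s.toList i ' ' = '<' then total + 1 + 1 else total + 1)
      else total) 0

-- ===== PORT B =====
-- outer while loop of Source B = this recursion; inner while = dropWhile
def runKeys : List Char → List Char
  | [] => []
  | c :: rest => c :: runKeys (rest.dropWhile (· == c))
termination_by l => l.length
decreasing_by
  have := List.length_dropWhile_le (· == c) rest
  simp; omega

def num_turns2_alt (s : String) : Int :=
  let keys := runKeys s.toList
  if keys = [] then 0
  else (keys.length : Int) - 1 + (keys.dropLast.count '<' : Int)

-- ===== PRECONDITION & SPEC =====
def Spec_num_turns2 (s : String) (out : Int) : Prop := out = num_turns2_alt s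
instance (s : String) (out : Int) : Decidable (Spec_num_turns2 s out) := by unfold Spec_num_turns2; infer_instance

-- ===== CLAIM (what is proved, stated in full; the proofs are below) =====
def Claim_equal_num_turns2 : Prop := ∀ (s : String), Dom_num_turns2 s → Spec_num_turns2 s (num_turns2 s)

-- ===== LEMMAS AND PROOFS =====

-- pairwise transition cost: the common ground of both programs
def pairCost : List Char → Int
  | [] => 0
  | [_] => 0
  | a :: b :: t => (if a ≠ b then (if a = '<' then 2 else 1) else 0) + pairCost (b :: t)


-- head-transition cost shared by both characterisations
def headCost (a b : Char) : Int := if a ≠ b then (if a = '<' then 2 else 1) else 0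

def stepF (a b : Char) (total : Int) : Int :=
  if a ≠ b then (if a = '<' then total + 1 + 1 else total + 1) else total

lemma stepF_eq (a b : Char) (t : Int) : stepF a b t = t + headCost a b := by
  unfold stepF headCost; split_ifs <;> ring

lemma pairCost_cons (a b : Char) (t : List Char) :
    pairCost (a :: b :: t) = headCost a b + pairCost (b :: t) := by
  simp [pairCost, headCost]

lemma pyGetD_cons_nat (x : Char) (l : List Char) (m : Nat) :
    PySem.List.pyGetD (x :: l) ((m : Int) + 1) ' ' = PySem.List.pyGetD l (m : Int) ' ' := by
  have h : ((m : Int) + 1) = ((m + 1 : Nat) : Int) := by push_cast; ring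
  rw [h, PySem.List.pyGetD_natCast, PySem.List.pyGetD_natCast]
  simp

-- shifting the index fold down one position past a cons cell
lemma shift_fold_aux (x : Char) (l : List Char) (F : Int -> Char -> Char -> Int) :
    ∀ (k m : Nat) (acc : Int), (k : Int) = (l.length : Int) - 1 - (m : Int) →
    (PySem.List.pyRange ((m : Int) + 1) ((l.length : Int) - 1 + 1) 1).foldl
      (fun acc i => F acc (PySem.List.pyGetD (x :: l) i ' ') (PySem.List.pyGetD (x :: l) (i + 1) ' ')) acc
    = (PySem.List.pyRange (m : Int) ((l.length : Int) - 1) 1).foldl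
      (fun acc i => F acc (PySem.List.pyGetD l i ' ') (PySem.List.pyGetD l (i + 1) ' ')) acc := by
  intro k
  induction k with
  | zero =>
    intro m acc hk
    rw [PySem.List.pyRange_one_eq_nil (by omega), PySem.List.pyRange_one_eq_nil (by omega)]
    rfl
  | succ k ih =>
    intro m acc hk
    have hb1 : ((m : Int) + 1) < ((l.length : Int) - 1 + 1) := by omega
    have hb2 : ((m : Int)) < ((l.length : Int) - 1) := by omega
    rw [PySem.List.pyRange_one_cons hb1, PySem.List.pyRange_one_cons hb2,
      List.foldl_cons, List.foldl_cons, pyGetD_cons_nat]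
    have h2 : PySem.List.pyGetD (x :: l) ((m : Int) + 1 + 1) ' '
        = PySem.List.pyGetD l ((m : Int) + 1) ' ' := by
      have h' : ((m : Int) + 1) = ((m + 1 : Nat) : Int) := by push_cast; ring
      rw [h', pyGetD_cons_nat]
    rw [h2]
    have h' : ((m : Int) + 1) = ((m + 1 : Nat) : Int) := by push_cast; ring
    rw [h']
    exact ih (m + 1) _ (by push_cast; omega)

lemma shift_fold (x : Char) (l : List Char) (F : Int -> Char -> Char -> Int)
    (m : Nat) (acc : Int) :
    (PySem.List.pyRange ((m : Int) + 1) ((l.length : Int) - 1 + 1) 1).foldl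
      (fun acc i => F acc (PySem.List.pyGetD (x :: l) i ' ') (PySem.List.pyGetD (x :: l) (i + 1) ' ')) acc
    = (PySem.List.pyRange (m : Int) ((l.length : Int) - 1) 1).foldl
      (fun acc i => F acc (PySem.List.pyGetD l i ' ') (PySem.List.pyGetD l (i + 1) ' ')) acc := by
  by_cases hb : (l.length : Int) - 1 ≤ (m : Int)
  · rw [PySem.List.pyRange_one_eq_nil (by omega), PySem.List.pyRange_one_eq_nil hb]
    rfl
  · exact shift_fold_aux x l F (l.length - 1 - m) m acc (by omega)

lemma foldA : ∀ (t : List Char) (x : Char) (acc : Int),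
    (PySem.List.pyRange 0 (((x :: t).length : Int) - 1) 1).foldl
      (fun total i => stepF (PySem.List.pyGetD (x :: t) i ' ')
        (PySem.List.pyGetD (x :: t) (i + 1) ' ') total) acc
    = acc + pairCost (x :: t) := by
  intro t
  induction t with
  | nil =>
    intro x acc
    rw [PySem.List.pyRange_one_eq_nil (by simp)]
    simp [pairCost]
  | cons y u ih =>
    intro x acc
    have hlen : (((x :: y :: u).length : Int) - 1) = ((((y :: u).length : Int) - 1) + 1) := by
      simp only [List.length_cons]; push_cast; ring
    rw [hlen, PySem.List.pyRange_one_cons (by simp only [List.length_cons]; push_cast; omega),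
      List.foldl_cons]
    have h0 : PySem.List.pyGetD (x :: y :: u) (0 : Int) ' ' = x :=
      PySem.List.pyGetD_zero_cons x (y :: u) ' '
    have h1 : PySem.List.pyGetD (x :: y :: u) ((0 : Int) + 1) ' ' = y := by
      have : ((0 : Int) + 1) = ((0 : Nat) : Int) + 1 := by norm_num
      rw [this, pyGetD_cons_nat]
      exact PySem.List.pyGetD_zero_cons y u ' '
    rw [h0, h1]
    have hs := shift_fold x (y :: u) (fun acc a b => stepF a b acc) 0 (stepF x y acc)
    simp only [Nat.cast_zero, zero_add] at hs ⊢
    rw [hs, ih y (stepF x y acc), stepF_eq, pairCost_cons]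
    ring

-- B side: run keys
lemma runKeys_cons (c : Char) (l : List Char) :
    runKeys (c :: l) = c :: runKeys (l.dropWhile (· == c)) := by
  simp [runKeys]

def altVal (l : List Char) : Int :=
  if runKeys l = [] then 0
  else ((runKeys l).length : Int) - 1 + (((runKeys l).dropLast.count '<' : Nat) : Int)

lemma foldB : ∀ (t : List Char) (x : Char), altVal (x :: t) = pairCost (x :: t) := by
  intro t
  induction t with
  | nil =>
    intro x
    simp [altVal, runKeys, pairCost]
  | cons y u ih =>
    intro x
    by_cases hxy : x = y
    · have hr : runKeys (x :: y :: u) = runKeys (y :: u) := by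
        subst hxy
        rw [runKeys_cons, runKeys_cons]
        simp
      have h1 : altVal (x :: y :: u) = altVal (y :: u) := by
        unfold altVal; rw [hr]
      rw [h1, ih y, pairCost_cons]
      simp [headCost, hxy]
    · have hdw : (y :: u).dropWhile (· == x) = y :: u := by
        rw [List.dropWhile_cons_of_neg]; simp [Ne.symm hxy]
      have hr : runKeys (x :: y :: u) = x :: runKeys (y :: u) := by
        rw [runKeys_cons, hdw]
      have hk : runKeys (y :: u) = y :: runKeys (u.dropWhile (· == y)) := runKeys_cons y u
      have hne : runKeys (y :: u) ≠ [] := by rw [hk]; simp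
      rw [pairCost_cons, ← ih y]
      unfold altVal
      rw [hr, if_neg (by simp), if_neg hne, List.dropLast_cons_of_ne_nil hne, List.count_cons]
      have hhc : headCost x y = (if x = '<' then 2 else 1) := by simp [headCost, hxy]
      rw [hhc]
      by_cases hx : x = '<'
      · rw [if_pos hx, if_pos (by simp [hx])]
        simp only [List.length_cons]
        push_cast
        omega
      · rw [if_neg hx, if_neg (by simp [hx])]
        simp only [List.length_cons]
        push_cast
        omega

-- ===== VERDICT (by name: the statement is the Claim_ definition above) =====
theorem num_turns2_spec : Claim_equal_num_turns2 := by
  unfold Claim_equal_num_turns2 Spec_num_turns2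
  intro s _
  unfold num_turns2 num_turns2_alt
  rw [PySem.Str.len_eq]
  cases h : s.toList with
  | nil =>
    rw [PySem.List.pyRange_one_eq_nil (by simp)]
    simp [runKeys]
  | cons x t =>
    have hA := foldA t x 0
    simp only [stepF] at hA
    rw [hA, zero_add]
    have hB := foldB t x
    unfold altVal at hB
    rw [← hB]
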